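-- pv_equiv track=rewrite | github.com/LeoSenthan/ProjectEuler-First-100 | BONUS/303/#303.py | f
-- ===== SOURCE A (Python) =====
-- def f(n):
--     curr=1
--     while True:
--         check=sorted(list(set(str(n*curr))))
--         flag=True
--         for char in check:
--             if char not in "012":
--                 flag=False
--                 break
--         if flag==True:
--             return n*curr
--         curr+=1
-- ===== SOURCE B (Python) =====
-- def f(n):
--     # Smallest multiple of n whose decimal digits all lie in "012".
--     # Instead of scanning the multiples of n, enumerate the candidate numbers
--     # themselves in increasing order: the k-th positive such number is
--     # k written in base three and read in base ten.
--     if n == 0: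
--         return 0
--     k = 1
--     while True:
--         m, p, t = 0, 1, k
--         while t:
--             m += (t % 3) * p
--             t //= 3
--             p *= 10
--         if m % n == 0:
--             return m
--         k += 1
-- ===== Notes on version B (the rewrite author's own statement) =====
-- stated objective: alternative
-- what changed: A scans the multiples of n in order and string-checks each one's digits via sorted(set(str(...))); B instead enumerates the candidate answers themselves in increasing order (the k-th positive number whose decimal digits all lie in "012" is k written in base three and read in base ten) and returns the first one divisible by n.
import Mathlib
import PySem

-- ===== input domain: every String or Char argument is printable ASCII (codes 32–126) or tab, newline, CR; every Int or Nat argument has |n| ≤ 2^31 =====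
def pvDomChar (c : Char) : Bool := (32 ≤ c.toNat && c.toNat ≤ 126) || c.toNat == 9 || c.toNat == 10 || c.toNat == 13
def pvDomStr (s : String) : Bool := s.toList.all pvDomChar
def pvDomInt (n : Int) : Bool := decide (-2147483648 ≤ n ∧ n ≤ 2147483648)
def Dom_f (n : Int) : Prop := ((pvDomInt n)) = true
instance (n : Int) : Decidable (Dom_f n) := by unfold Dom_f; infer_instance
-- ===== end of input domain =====

-- B replaces A's scan over the multiples of n by an enumeration of the candidate
-- numbers themselves (those whose decimal digits all lie in "012": k written in base
-- three, read in base ten), checking divisibility of each candidate instead of the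
-- digits of each multiple (objective: alternative).

-- ===== PORT A =====
-- 'for char in check: if char not in "012": flag=False; break' (flag starts True)
def fCharLoop : List Char → Bool → Bool
  | [], flag => flag
  | c :: cs, flag =>
    if ("012".toList.contains c) = false then false
    else fCharLoop cs flag

-- 'check = sorted(list(set(str(m))))' plus the flag loop returning flag
def fCheck (m : Int) : Bool :=
  fCharLoop (PySem.List.sorted (PySem.Set.ofList (PySem.Int.toStr m).toList) (fun c => c) false) true

-- 'while True: … curr += 1', made total with the fuel bound 10^(n.toNat+1)
-- (proved below never to be reached while Pre_f holds)
def fLoop (n : Int) (bound curr : Nat) : Int :=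
  if _h : bound ≤ curr then 0
  else if fCheck (n * (curr : Int)) then n * (curr : Int)
  else fLoop n bound (curr + 1)
termination_by bound - curr
decreasing_by omega

def f (n : Int) : Int := fLoop n (10 ^ (n.toNat + 1)) 1

-- ===== PORT B =====
-- inner 'while t: m += (t % 3) * p; t //= 3; p *= 10' (t stays a nonnegative int
-- in Source B, so Nat's % and / are exactly Python's % and // here)
def b3core (t m p : Nat) : Nat :=
  if _h : t = 0 then m else b3core (t / 3) (m + (t % 3) * p) (p * 10)
termination_by t
decreasing_by exact Nat.div_lt_self (Nat.pos_of_ne_zero _h) (by norm_num)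

-- outer 'while True: … k += 1', made total with the same kind of fuel bound
def gLoop (n : Int) (bound k : Nat) : Int :=
  if _h : bound ≤ k then 0
  else if PySem.Int.mod ((b3core k 0 1 : Nat) : Int) n = 0 then ((b3core k 0 1 : Nat) : Int)
  else gLoop n bound (k + 1)
termination_by bound - k
decreasing_by omega

def f_alt (n : Int) : Int := if n = 0 then 0 else gLoop n (10 ^ (n.toNat + 1)) 1

-- ===== PRECONDITION & SPEC =====
-- For negative n every product n*curr is negative, its str() starts with '-', and A's
-- while-loop never returns (it diverges); Pre_f keeps exactly the inputs where A returns.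
def Pre_f (n : Int) : Prop := 0 ≤ n
instance (n : Int) : Decidable (Pre_f n) := by unfold Pre_f; infer_instance
def pvWitness_f : Int := 7

def Spec_f (n : Int) (out : Int) : Prop := out = f_alt n
instance (n : Int) (out : Int) : Decidable (Spec_f n out) := by unfold Spec_f; infer_instance

-- ===== CLAIM (what is proved, stated in full; the proofs are below) =====
def Claim_equal_f : Prop := ∀ (n : Int), Dom_f n → Pre_f n → Spec_f n (f n)

-- ===== LEMMAS AND PROOFS =====

-- mathematical value of B's inner loop: read base-3 digits of k in base 10
def b3 (k : Nat) : Nat :=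
  if _h : k = 0 then 0 else k % 3 + 10 * b3 (k / 3)
termination_by k
decreasing_by exact Nat.div_lt_self (Nat.pos_of_ne_zero _h) (by norm_num)

-- all decimal digits of m lie in {0,1,2}
def good (m : Nat) : Bool :=
  if _h : m = 0 then true else (decide (m % 10 ≤ 2) && good (m / 10))
termination_by m
decreasing_by exact Nat.div_lt_self (Nat.pos_of_ne_zero _h) (by norm_num)

-- inverse of b3 on good numbers: read base-10 digits of m in base 3
def inv3 (m : Nat) : Nat :=
  if _h : m = 0 then 0 else m % 10 + 3 * inv3 (m / 10)
termination_by m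
decreasing_by exact Nat.div_lt_self (Nat.pos_of_ne_zero _h) (by norm_num)

-- the decimal rendering of m, most significant digit first (= Nat.toDigits 10 m)
def rend (m : Nat) : List Char :=
  if _h : m < 10 then [Nat.digitChar m] else rend (m / 10) ++ [Nat.digitChar (m % 10)]
termination_by m
decreasing_by exact Nat.div_lt_self (by omega) (by norm_num)

-- the decimal repunit with t ones
def rep : Nat → Nat
  | 0 => 0
  | t + 1 => 1 + 10 * rep t

theorem b3_zero : b3 0 = 0 := by rw [b3]; simp

theorem b3_eq (k : Nat) (h : k ≠ 0) : b3 k = k % 3 + 10 * b3 (k / 3) := by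
  conv_lhs => rw [b3]
  rw [dif_neg h]

theorem good_zero : good 0 = true := by rw [good]; simp

theorem good_eq (m : Nat) (h : m ≠ 0) :
    good m = (decide (m % 10 ≤ 2) && good (m / 10)) := by
  conv_lhs => rw [good]
  rw [dif_neg h]

theorem inv3_zero : inv3 0 = 0 := by rw [inv3]; simp

theorem inv3_eq (m : Nat) (h : m ≠ 0) : inv3 m = m % 10 + 3 * inv3 (m / 10) := by
  conv_lhs => rw [inv3]
  rw [dif_neg h]

theorem toDigitsCore_eq_rend (fuel n : Nat) (ds : List Char) (h : n < fuel) :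
    Nat.toDigitsCore 10 fuel n ds = rend n ++ ds := by
  induction n using Nat.strong_induction_on generalizing fuel ds with
  | _ n ih =>
    match fuel, h with
    | fuel + 1, h =>
      rw [Nat.toDigitsCore]
      by_cases h10 : n < 10
      · rw [rend]
        simp [Nat.div_eq_of_lt h10, Nat.mod_eq_of_lt h10, h10]
      · have hd : ¬ (n / 10 = 0) := by
          intro h0; exact h10 (by omega)
        simp only [if_neg hd]
        rw [ih (n / 10) (by omega) fuel _ (by omega)]
        conv_rhs => rw [rend]
        simp [h10, List.append_assoc]

theorem rend_all_eq_good (m : Nat) :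
    (rend m).all (fun c => "012".toList.contains c) = good m := by
  induction m using Nat.strong_induction_on with
  | _ m ih =>
    by_cases h10 : m < 10
    · rw [rend, good.eq_def]
      simp only [dif_pos h10, List.all_cons, List.all_nil, Bool.and_true]
      by_cases h0 : m = 0
      · subst h0; decide
      · simp only [dif_neg h0]
        rw [good.eq_def]
        simp only [Nat.div_eq_of_lt h10, Nat.mod_eq_of_lt h10]
        interval_cases m <;> decide
    · rw [rend, good.eq_def]
      simp only [dif_neg h10, dif_neg (show ¬ m = 0 by omega), List.all_append,
        List.all_cons, List.all_nil, Bool.and_true]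
      rw [ih (m / 10) (by omega)]
      have h2 : m % 10 < 10 := Nat.mod_lt _ (by norm_num)
      have : ("012".toList.contains (Nat.digitChar (m % 10))) = decide (m % 10 ≤ 2) := by
        set r := m % 10 with hr
        interval_cases r <;> decide
      rw [this, Bool.and_comm]

theorem fCharLoop_true (cs : List Char) :
    fCharLoop cs true = cs.all (fun c => "012".toList.contains c) := by
  induction cs with
  | nil => rfl
  | cons c cs ih =>
    rw [fCharLoop, List.all_cons]
    by_cases h : ("012".toList.contains c) = true
    · rw [if_neg (by rw [h]; simp), ih, h, Bool.true_and]
    · have h' : "012".toList.contains c = false := by simpa using h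
      rw [if_pos h', h', Bool.false_and]

theorem fCheck_natCast (m : Nat) : fCheck (m : Int) = good m := by
  rw [fCheck, PySem.Int.toList_toStr, fCharLoop_true]
  have hchars : PySem.Int.toChars (m : Int) = Nat.toDigits 10 m := by
    rw [PySem.Int.toChars]
    simp
  rw [hchars, Nat.toDigits, toDigitsCore_eq_rend m.succ m [] (Nat.lt_succ_self m),
    List.append_nil, ← rend_all_eq_good]
  -- all over sorted(set(xs)) equals all over xs, since membership coincides
  by_cases hall : (rend m).all (fun c => "012".toList.contains c) = true
  · rw [hall]
    apply List.all_eq_true.mpr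
    intro c hc
    have : c ∈ rend m := by
      have := (PySem.List.mem_sorted _ _ _ c).mp hc
      exact (PySem.Set.mem_ofList _ c).mp this
    exact List.all_eq_true.mp hall c this
  · have hall' : (rend m).all (fun c => "012".toList.contains c) = false :=
      Bool.eq_false_iff.mpr hall
    rw [hall']
    apply Bool.eq_false_iff.mpr
    intro hcon
    apply hall
    apply List.all_eq_true.mpr
    intro c hc
    have hmem : c ∈ PySem.List.sorted (PySem.Set.ofList (rend m)) (fun c => c) false := by
      rw [PySem.List.mem_sorted]
      exact (PySem.Set.mem_ofList _ c).mpr hc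
    exact List.all_eq_true.mp hcon c hmem

theorem b3core_eq (t m p : Nat) : b3core t m p = m + p * b3 t := by
  induction t using Nat.strong_induction_on generalizing m p with
  | _ t ih =>
    by_cases h0 : t = 0
    · subst h0; rw [b3core, b3]; simp
    · rw [b3core, b3]
      simp only [dif_neg h0]
      rw [ih (t / 3) (Nat.div_lt_self (Nat.pos_of_ne_zero h0) (by norm_num))]
      ring

theorem b3_mod10 (k : Nat) (h : k ≠ 0) : b3 k % 10 = k % 3 ∧ b3 k / 10 = b3 (k / 3) := by
  rw [b3_eq k h]
  have h3 : k % 3 < 3 := Nat.mod_lt _ (by norm_num)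
  omega

theorem good_b3 (k : Nat) : good (b3 k) = true := by
  induction k using Nat.strong_induction_on with
  | _ k ih =>
    by_cases h0 : k = 0
    · subst h0; rw [b3_zero]; exact good_zero
    · obtain ⟨hm, hd⟩ := b3_mod10 k h0
      by_cases hb0 : b3 k = 0
      · rw [hb0]; exact good_zero
      · rw [good_eq _ hb0, hm, hd]
        have h3 : k % 3 < 3 := Nat.mod_lt _ (by norm_num)
        rw [ih (k / 3) (Nat.div_lt_self (Nat.pos_of_ne_zero h0) (by norm_num))]
        simp; omega

theorem b3_lt_b3 (k k' : Nat) (h : k < k') : b3 k < b3 k' := by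
  induction k' using Nat.strong_induction_on generalizing k with
  | _ k' ih =>
    have hk'0 : k' ≠ 0 := by omega
    have hk' : b3 k' = k' % 3 + 10 * b3 (k' / 3) := b3_eq k' hk'0
    by_cases hq : k / 3 = k' / 3
    · have hr : k % 3 < k' % 3 := by omega
      by_cases hk0 : k = 0
      · rw [hk0, b3_zero]; omega
      · rw [b3_eq k hk0, hq]; omega
    · have hqlt : k / 3 < k' / 3 := by omega
      have hih : b3 (k / 3) < b3 (k' / 3) :=
        ih (k' / 3) (Nat.div_lt_self (Nat.pos_of_ne_zero hk'0) (by norm_num)) _ hqlt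
      have h1 : b3 k ≤ k % 3 + 10 * b3 (k / 3) := by
        by_cases hk0 : k = 0
        · subst hk0; simp [b3_zero]
        · rw [b3_eq k hk0]
      have h3 : k % 3 < 3 := Nat.mod_lt _ (by norm_num)
      omega

theorem b3_le_b3 (k k' : Nat) (h : k ≤ k') : b3 k ≤ b3 k' := by
  rcases Nat.lt_or_ge k k' with h' | h'
  · exact Nat.le_of_lt (b3_lt_b3 k k' h')
  · have : k = k' := by omega
    subst this; exact Nat.le_refl _

theorem le_b3 (k : Nat) : k ≤ b3 k := by
  induction k using Nat.strong_induction_on with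
  | _ k ih =>
    by_cases h0 : k = 0
    · subst h0; rw [b3_zero]
    · rw [b3_eq k h0]
      have := ih (k / 3) (Nat.div_lt_self (Nat.pos_of_ne_zero h0) (by norm_num))
      omega

theorem b3_inv3 (m : Nat) (h : good m = true) : b3 (inv3 m) = m := by
  induction m using Nat.strong_induction_on with
  | _ m ih =>
    by_cases h0 : m = 0
    · subst h0; rw [inv3_zero, b3_zero]
    · rw [inv3_eq m h0]
      rw [good_eq m h0] at h
      simp only [Bool.and_eq_true, decide_eq_true_eq] at h
      obtain ⟨h2, hg⟩ := h
      have hrec := ih (m / 10) (Nat.div_lt_self (Nat.pos_of_ne_zero h0) (by norm_num)) hg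
      by_cases hz : m % 10 + 3 * inv3 (m / 10) = 0
      · -- then m % 10 = 0 and inv3 (m/10) = 0; b3 0 = 0, must show 0 = m
        have h2' : inv3 (m / 10) = 0 := by omega
        rw [h2', b3_zero] at hrec
        rw [hz, b3_zero]
        omega
      · rw [b3_eq _ hz]
        have hmod : (m % 10 + 3 * inv3 (m / 10)) % 3 = m % 10 := by omega
        have hdiv : (m % 10 + 3 * inv3 (m / 10)) / 3 = inv3 (m / 10) := by omega
        rw [hmod, hdiv, hrec]
        omega

theorem inv3_le (m : Nat) : inv3 m ≤ m := by
  induction m using Nat.strong_induction_on with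
  | _ m ih =>
    by_cases h0 : m = 0
    · subst h0; rw [inv3_zero]
    · rw [inv3_eq m h0]
      have := ih (m / 10) (Nat.div_lt_self (Nat.pos_of_ne_zero h0) (by norm_num))
      omega

theorem good_rep (t : Nat) : good (rep t) = true := by
  induction t with
  | zero => rw [rep]; exact good_zero
  | succ t ih =>
    rw [rep]
    have h0 : 1 + 10 * rep t ≠ 0 := by omega
    rw [good_eq _ h0]
    have hm : (1 + 10 * rep t) % 10 = 1 := by omega
    have hd : (1 + 10 * rep t) / 10 = rep t := by omega
    rw [hm, hd, ih]; simp

theorem rep_lt (t : Nat) : rep t < 10 ^ t := by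
  induction t with
  | zero => simp [rep]
  | succ t ih => rw [rep, pow_succ]; omega

theorem rep_add (a b : Nat) : rep (a + b) = rep a + 10 ^ a * rep b := by
  induction a with
  | zero => simp [rep]
  | succ a ih =>
    have : a + 1 + b = (a + b) + 1 := by omega
    rw [this, rep, ih, rep, pow_succ]
    ring

theorem rep_pos (t : Nat) (h : 1 ≤ t) : 1 ≤ rep t := by
  match t, h with
  | t + 1, _ => rw [rep]; omega

theorem good_pow10_mul (e m : Nat) (h : good m = true) : good (10 ^ e * m) = true := by
  induction e with
  | zero => simpa using h
  | succ e ih =>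
    rw [pow_succ]
    have : 10 ^ e * 10 * m = 10 * (10 ^ e * m) := by ring
    rw [this]
    by_cases h0 : 10 ^ e * m = 0
    · rw [h0]
      have : (10 : Nat) * 0 = 0 := by norm_num
      rw [this]; exact good_zero
    · rw [good_eq _ (by omega : ¬ 10 * (10 ^ e * m) = 0)]
      have hm : (10 * (10 ^ e * m)) % 10 = 0 := by omega
      have hd : (10 * (10 ^ e * m)) / 10 = 10 ^ e * m := by omega
      rw [hm, hd, ih]; simp

theorem good_multiple_of_modeq (n i j : Nat) (hij : i < j) (hjn : j ≤ n)
    (heq : rep i % n = rep j % n) :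
    ∃ m, 1 ≤ m ∧ m < 10 ^ (n + 1) ∧ n ∣ m ∧ good m = true := by
  have hji : j = i + (j - i) := by omega
  have h1 : rep j = rep i + 10 ^ i * rep (j - i) := by
    conv_lhs => rw [hji]
    rw [rep_add]
  refine ⟨10 ^ i * rep (j - i), ?_, ?_, ?_, good_pow10_mul _ _ (good_rep _)⟩
  · calc 1 = 1 * 1 := by norm_num
      _ ≤ 10 ^ i * rep (j - i) :=
        Nat.mul_le_mul (Nat.one_le_pow _ _ (by norm_num)) (rep_pos _ (by omega))
  · have h2 : rep j < 10 ^ j := rep_lt j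
    have h3 : (10 : Nat) ^ j ≤ 10 ^ (n + 1) := Nat.pow_le_pow_right (by norm_num) (by omega)
    omega
  · have hle : rep i ≤ rep j := by omega
    have hdvd : n ∣ rep j - rep i := (Nat.modEq_iff_dvd' hle).mp heq
    have h4 : rep j - rep i = 10 ^ i * rep (j - i) := by omega
    rwa [h4] at hdvd

theorem exists_good_multiple (n : Nat) (hn : 1 ≤ n) :
    ∃ m, 1 ≤ m ∧ m < 10 ^ (n + 1) ∧ n ∣ m ∧ good m = true := by
  have hmaps : ∀ i ∈ Finset.range (n + 1), rep i % n ∈ Finset.range n := by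
    intro i _
    exact Finset.mem_range.mpr (Nat.mod_lt _ (by omega))
  have hcard : (Finset.range n).card < (Finset.range (n + 1)).card := by
    simp
  obtain ⟨i, hi, j, hj, hne, heq⟩ :=
    Finset.exists_ne_map_eq_of_card_lt_of_maps_to hcard hmaps
  have hi' : i ≤ n := by have := Finset.mem_range.mp hi; omega
  have hj' : j ≤ n := by have := Finset.mem_range.mp hj; omega
  rcases Nat.lt_or_ge i j with hij | hij
  · exact good_multiple_of_modeq n i j hij hj' heq
  · exact good_multiple_of_modeq n j i (by omega) hi' heq.symm

theorem fLoop_finds (n : Int) (bound c : Nat) (hcb : c < bound)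
    (hcheck : fCheck (n * (c : Int)) = true)
    (hmin : ∀ c', 1 ≤ c' → c' < c → fCheck (n * (c' : Int)) = false) :
    ∀ curr, 1 ≤ curr → curr ≤ c → fLoop n bound curr = n * (c : Int) := by
  intro curr h1 h2
  induction hd : c - curr using Nat.strong_induction_on generalizing curr with
  | _ d ih =>
    by_cases hcc : curr = c
    · subst hcc
      rw [fLoop, dif_neg (by omega), if_pos hcheck]
    · have hlt : curr < c := by omega
      rw [fLoop, dif_neg (by omega), if_neg (by rw [hmin curr h1 hlt]; simp)]
      exact ih (c - (curr + 1)) (by omega) (curr + 1) (by omega) (by omega) rfl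

theorem gLoop_finds (n : Int) (bound k : Nat) (hkb : k < bound)
    (hcheck : PySem.Int.mod ((b3 k : Nat) : Int) n = 0)
    (hmin : ∀ k', 1 ≤ k' → k' < k → ¬ PySem.Int.mod ((b3 k' : Nat) : Int) n = 0) :
    ∀ k0, 1 ≤ k0 → k0 ≤ k → gLoop n bound k0 = ((b3 k : Nat) : Int) := by
  intro k0 h1 h2
  induction hd : k - k0 using Nat.strong_induction_on generalizing k0 with
  | _ d ih =>
    have hb3 : ∀ t : Nat, b3core t 0 1 = b3 t := by
      intro t; rw [b3core_eq]; omega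
    by_cases hkk : k0 = k
    · subst hkk
      rw [gLoop, dif_neg (by omega), hb3, if_pos hcheck]
    · have hlt : k0 < k := by omega
      rw [gLoop, dif_neg (by omega), hb3, if_neg (hmin k0 h1 hlt)]
      exact ih (k - (k0 + 1)) (by omega) (k0 + 1) (by omega) (by omega) rfl

-- ===== VERDICT (by name: the statement is the Claim_ definition above) =====
theorem f_spec : Claim_equal_f := by
  intro n _ hpre
  unfold Spec_f
  rcases eq_or_lt_of_le hpre with h0 | hpos
  · -- n is zero: A's first candidate already passes the digit check, B short-circuits
    subst h0
    rw [f, f_alt, if_pos rfl, fLoop, dif_neg (by norm_num)]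
    have : (0 : Int) * ((1 : Nat) : Int) = ((0 : Nat) : Int) := by norm_num
    rw [this, fCheck_natCast, good_zero]
    simp
  · -- n ≥ 1
    set N : Nat := n.toNat with hNdef
    have hn : n = (N : Int) := by omega
    have hN1 : 1 ≤ N := by omega
    obtain ⟨m0, hm1, hmlt, hdvd, hgood⟩ := exists_good_multiple N hN1
    -- least multiple index
    have hc0 : 1 ≤ m0 / N ∧ good (N * (m0 / N)) = true := by
      constructor
      · exact (Nat.one_le_div_iff (by omega)).mpr (Nat.le_of_dvd (by omega) hdvd)
      · rw [Nat.mul_div_cancel' hdvd]; exact hgood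
    have hexC : ∃ c, 1 ≤ c ∧ good (N * c) = true := ⟨m0 / N, hc0⟩
    set cstar := Nat.find hexC with hcs
    obtain ⟨hc1, hcgood⟩ := Nat.find_spec hexC
    have hcmin : ∀ c, 1 ≤ c → c < cstar → good (N * c) = false := by
      intro c h1 h2
      have := Nat.find_min hexC h2
      simp only [not_and] at this
      exact Bool.eq_false_iff.mpr (this h1)
    have hcle : cstar ≤ m0 / N := Nat.find_min' hexC hc0
    have hcbound : cstar < 10 ^ (N + 1) := by
      have : m0 / N ≤ m0 := Nat.div_le_self _ _
      omega
    -- least base-3 index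
    have hexK : ∃ k, 1 ≤ k ∧ N ∣ b3 k := by
      refine ⟨inv3 m0, ?_, ?_⟩
      · by_contra h
        have hz : inv3 m0 = 0 := by omega
        have := b3_inv3 m0 hgood
        rw [hz, b3_zero] at this
        omega
      · rw [b3_inv3 m0 hgood]; exact hdvd
    set kstar := Nat.find hexK with hks
    obtain ⟨hk1, hkdvd⟩ := Nat.find_spec hexK
    have hkmin : ∀ k, 1 ≤ k → k < kstar → ¬ N ∣ b3 k := by
      intro k h1 h2
      have := Nat.find_min hexK h2
      simp only [not_and] at this
      exact this h1
    have hkle : kstar ≤ inv3 m0 := by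
      apply Nat.find_min'
      refine ⟨?_, ?_⟩
      · by_contra h
        have hz : inv3 m0 = 0 := by omega
        have := b3_inv3 m0 hgood
        rw [hz, b3_zero] at this
        omega
      · rw [b3_inv3 m0 hgood]; exact hdvd
    have hkbound : kstar < 10 ^ (N + 1) := by
      have := inv3_le m0
      omega
    -- the two minima describe the same number
    have hkey : N * cstar = b3 kstar := by
      have hle1 : N * cstar ≤ b3 kstar := by
        -- b3 kstar is a good positive multiple of N, so its index bounds cstar
        have hgoodk : good (b3 kstar) = true := good_b3 kstar
        have hposk : 1 ≤ b3 kstar := le_trans hk1 (le_b3 kstar)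
        obtain ⟨c1, hc1eq⟩ := hkdvd
        have hc11 : 1 ≤ c1 := by
          rcases Nat.eq_zero_or_pos c1 with h | h
          · subst h
            rw [Nat.mul_zero] at hc1eq
            exact absurd hposk (by rw [hc1eq]; decide)
          · exact h
        have : cstar ≤ c1 := by
          by_contra h
          have := hcmin c1 hc11 (by omega)
          rw [← hc1eq] at this
          rw [hgoodk] at this
          exact absurd this (by simp)
        calc N * cstar ≤ N * c1 := Nat.mul_le_mul_left _ this
          _ = b3 kstar := hc1eq.symm
      have hle2 : b3 kstar ≤ N * cstar := by
        have hgoodm : good (N * cstar) = true := hcgood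
        have hposm : 1 ≤ N * cstar := by
          have := Nat.mul_le_mul hN1 hc1
          omega
        have hbeq : b3 (inv3 (N * cstar)) = N * cstar := b3_inv3 _ hgoodm
        have hk2 : 1 ≤ inv3 (N * cstar) := by
          by_contra h
          have hz : inv3 (N * cstar) = 0 := by omega
          rw [hz, b3_zero] at hbeq
          omega
        have : kstar ≤ inv3 (N * cstar) := by
          by_contra h
          exact hkmin _ hk2 (by omega) (by rw [hbeq]; exact ⟨cstar, rfl⟩)
        calc b3 kstar ≤ b3 (inv3 (N * cstar)) := b3_le_b3 _ _ this
          _ = N * cstar := hbeq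
      exact Nat.le_antisymm hle1 hle2
    -- evaluate both programs
    have hA : f n = ((N * cstar : Nat) : Int) := by
      rw [f]
      have hbnd : n.toNat = N := rfl
      rw [hbnd]
      have := fLoop_finds n (10 ^ (N + 1)) cstar hcbound
        (by rw [hn, show ((N : Int)) * ((cstar : Nat) : Int) = ((N * cstar : Nat) : Int) by push_cast; ring,
              fCheck_natCast]; exact hcgood)
        (by intro c' h1 h2
            rw [hn, show ((N : Int)) * ((c' : Nat) : Int) = ((N * c' : Nat) : Int) by push_cast; ring,
              fCheck_natCast]
            exact hcmin c' h1 h2)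
        1 (by omega) hc1
      rw [this, hn]
      push_cast; ring
    have hB : f_alt n = ((b3 kstar : Nat) : Int) := by
      rw [f_alt, if_neg (by omega)]
      have hbnd : n.toNat = N := rfl
      rw [hbnd]
      exact gLoop_finds n (10 ^ (N + 1)) kstar hkbound
        (by rw [PySem.Int.mod_eq_zero_iff_dvd, hn]
            exact Int.natCast_dvd_natCast.mpr hkdvd)
        (by intro k' h1 h2 hcon
            rw [PySem.Int.mod_eq_zero_iff_dvd, hn, Int.natCast_dvd_natCast] at hcon
            exact hkmin k' h1 h2 hcon)
        1 (by omega) hk1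
    rw [hA, hB, hkey]
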